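-- pv_equiv track=rewrite | github.com/cruzemcfarlane/Python_Personal_Practice_101 | test (1).py | print_R
-- ===== SOURCE A (Python) =====
-- def print_R(x):
--     result=' '
--     while x>=0:
--         if x%2 == 0:
--             result = result +'R'
--         else:
--             result+='R'+'R'
--         x=x-1
--     return result
-- ===== SOURCE B (Python) =====
-- def print_R(x):
--     # closed form: ints 0..x each add one R, odd ones add a second
--     return ' ' + 'R' * ((x + 1) + (x + 1) // 2)
-- ===== Notes on version B (the rewrite author's own statement) =====
-- stated objective: faster
-- what changed: Replaces the decrementing while-loop that appends one or two R characters per value with a closed-form arithmetic count of the Rs and a single string multiplication.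
import Mathlib
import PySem

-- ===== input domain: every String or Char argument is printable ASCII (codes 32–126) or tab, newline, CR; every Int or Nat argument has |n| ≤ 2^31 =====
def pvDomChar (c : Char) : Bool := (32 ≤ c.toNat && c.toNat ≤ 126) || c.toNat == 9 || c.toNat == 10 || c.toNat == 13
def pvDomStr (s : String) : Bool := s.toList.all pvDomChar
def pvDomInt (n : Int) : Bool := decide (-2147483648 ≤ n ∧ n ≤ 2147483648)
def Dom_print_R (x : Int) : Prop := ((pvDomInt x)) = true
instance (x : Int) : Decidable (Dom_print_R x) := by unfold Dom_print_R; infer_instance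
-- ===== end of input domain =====

-- B replaces the per-value append loop with a closed-form R-count and one replicate (objective: simpler).

-- ===== PORT A =====
def print_R_loop (x : Int) (result : String) : String :=
  if x ≥ 0 then
    print_R_loop (x - 1)
      (if PySem.Int.mod x 2 = 0 then result ++ "R" else result ++ "R" ++ "R")
  else result
termination_by (x + 1).toNat
decreasing_by omega

def print_R (x : Int) : String := print_R_loop x " "

-- ===== PORT B =====
def print_R_alt (x : Int) : String :=
  " " ++ String.ofList (List.replicate ((x + 1) + PySem.Int.floordiv (x + 1) 2).toNat 'R')

-- ===== PRECONDITION & SPEC =====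
def Spec_print_R (x : Int) (out : String) : Prop := out = print_R_alt x
instance (x : Int) (out : String) : Decidable (Spec_print_R x out) := by unfold Spec_print_R; infer_instance

-- ===== CLAIM (what is proved, stated in full; the proofs are below) =====
def Claim_equal_print_R : Prop := ∀ (x : Int), Dom_print_R x → Spec_print_R x (print_R x)

-- ===== LEMMAS AND PROOFS =====

-- closed-form R-count
def pvCount (x : Int) : Nat := ((x + 1) + PySem.Int.floordiv (x + 1) 2).toNat

lemma pvCount_step (x : Int) (hx : x ≥ 0) :
    pvCount x = (if PySem.Int.mod x 2 = 0 then 1 else 2) + pvCount (x - 1) := by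
  unfold pvCount
  rw [PySem.Int.floordiv_eq_ediv_of_pos (by omega), PySem.Int.floordiv_eq_ediv_of_pos (by omega),
      PySem.Int.mod_eq_emod_of_pos (by omega)]
  have h1 := Int.ediv_add_emod (x + 1) 2
  have h2 := Int.ediv_add_emod x 2
  have h3 := Int.emod_nonneg (x + 1) (by norm_num : (2:Int) ≠ 0)
  have h4 := Int.emod_lt_of_pos (x + 1) (by norm_num : (0:Int) < 2)
  have h5 := Int.emod_nonneg x (by norm_num : (2:Int) ≠ 0)
  have h6 := Int.emod_lt_of_pos x (by norm_num : (0:Int) < 2)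
  split_ifs with h <;> omega

lemma str_mk_append (a b : List Char) : String.ofList a ++ String.ofList b = String.ofList (a ++ b) := by
  simp

lemma strR_cons (l : List Char) : "R" ++ String.ofList l = String.ofList ('R' :: l) := by
  rw [show ("R" : String) = String.ofList ['R'] from by rfl, str_mk_append]; rfl

lemma strRR_cons (l : List Char) : "RR" ++ String.ofList l = String.ofList ('R' :: 'R' :: l) := by
  rw [show ("RR" : String) = String.ofList ['R', 'R'] from by rfl, str_mk_append]; rfl

lemma pvCount_of_neg (x : Int) (hx : x < 0) : pvCount x = 0 := by
  unfold pvCount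
  rw [PySem.Int.floordiv_eq_ediv_of_pos (by norm_num)]
  omega

lemma print_R_loop_eq (n : Nat) (x : Int) (r : String) (hx : x + 1 ≤ n) :
    print_R_loop x r = r ++ String.ofList (List.replicate (pvCount x) 'R') := by
  induction n generalizing x r with
  | zero =>
    rw [print_R_loop]
    have hneg : ¬ x ≥ 0 := by omega
    simp [hneg, pvCount_of_neg x (by omega)]
  | succ k ih =>
    rw [print_R_loop]
    by_cases hx0 : x ≥ 0
    · simp only [hx0, if_true]
      rw [ih (x - 1) _ (by omega), pvCount_step x hx0]
      split_ifs with h <;>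
        simp [String.append_assoc, List.replicate_add, List.replicate_succ,
              strR_cons, strRR_cons]
    · have : String.ofList [] = "" := rfl
      rw [pvCount_of_neg x (by omega)]; simp [hx0, this, String.append_empty]

-- ===== VERDICT (by name: the statement is the Claim_ definition above) =====
theorem print_R_spec : Claim_equal_print_R := by
  intro x _
  unfold Spec_print_R print_R print_R_alt
  exact print_R_loop_eq (x + 1).toNat x " " (by omega)
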